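-- pv_equiv track=rewrite | github.com/LeMaterial/lemat-genbench | scripts/run_benchmarks.py | create_preprocessor_config
-- ===== SOURCE A (Python) =====
-- from typing import Any, Dict, List
--
-- def create_preprocessor_config(benchmark_families: List[str]) -> Dict[str, Any]:
--     """Create preprocessor configuration based on required benchmark families."""
--     config = {
--         "distribution": False,
--         "stability": False,
--         "embeddings": False,
--     }
--
--     # Determine which preprocessors are needed
--     for family in benchmark_families:
--         if family in ["distribution", "jsdistance", "mmd", "frechet"]:
--             config["distribution"] = True
--         if family in ["stability", "sun"]:
--             config["stability"] = True
--         if family in ["frechet", "distribution"]:  # Distribution includes Frechet distance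
--             config["embeddings"] = True
--
--     return config
-- ===== SOURCE B (Python) =====
-- from typing import Any, Dict, List
--
-- def create_preprocessor_config(benchmark_families: List[str]) -> Dict[str, Any]:
--     """Create preprocessor configuration based on required benchmark families."""
--     return {
--         "distribution": any(f in {"distribution", "jsdistance", "mmd", "frechet"}
--                             for f in benchmark_families),
--         "stability": any(f in {"stability", "sun"} for f in benchmark_families),
--         "embeddings": any(f in {"frechet", "distribution"} for f in benchmark_families),
--     }
-- ===== Notes on version B (the rewrite author's own statement) =====
-- stated objective: idiomatic
-- what changed: B builds the dict directly with one independent any() scan per flag instead of mutating an initialized dict inside a single loop over families.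
import Mathlib
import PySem

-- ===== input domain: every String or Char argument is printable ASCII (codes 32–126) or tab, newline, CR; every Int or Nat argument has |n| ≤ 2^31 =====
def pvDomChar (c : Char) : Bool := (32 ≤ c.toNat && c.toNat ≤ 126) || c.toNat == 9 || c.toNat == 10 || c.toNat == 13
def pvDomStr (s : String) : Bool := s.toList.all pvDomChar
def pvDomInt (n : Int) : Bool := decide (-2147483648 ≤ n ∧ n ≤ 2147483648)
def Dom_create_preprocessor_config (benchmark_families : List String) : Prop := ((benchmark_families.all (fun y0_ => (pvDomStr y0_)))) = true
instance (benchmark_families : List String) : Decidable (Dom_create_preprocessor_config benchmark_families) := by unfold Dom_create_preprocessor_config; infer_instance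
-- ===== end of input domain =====

-- B builds the dict directly with one independent any() scan per flag instead of
-- mutating an initialized dict inside a single loop over families (idiomatic decomposition).

-- ===== PORT A =====
-- one iteration of A's for-loop body over the mutable dict
def pvStepA (config : PySem.Dict String Bool) (family : String) : PySem.Dict String Bool :=
  let config := if family ∈ ["distribution", "jsdistance", "mmd", "frechet"]
                then config.insert "distribution" true else config
  let config := if family ∈ ["stability", "sun"]
                then config.insert "stability" true else config
  let config := if family ∈ ["frechet", "distribution"]
                then config.insert "embeddings" true else config
  config

def create_preprocessor_config (benchmark_families : List String) : List (String × Bool) :=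
  (benchmark_families.foldl pvStepA
    (PySem.Dict.ofList [("distribution", false), ("stability", false), ("embeddings", false)])).items

-- ===== PORT B =====
def create_preprocessor_config_alt (benchmark_families : List String) : List (String × Bool) :=
  [("distribution", benchmark_families.any
      (fun f => f ∈ PySem.Set.ofList ["distribution", "jsdistance", "mmd", "frechet"])),
   ("stability", benchmark_families.any
      (fun f => f ∈ PySem.Set.ofList ["stability", "sun"])),
   ("embeddings", benchmark_families.any
      (fun f => f ∈ PySem.Set.ofList ["frechet", "distribution"]))]

-- ===== PRECONDITION & SPEC =====
def Spec_create_preprocessor_config (benchmark_families : List String) (out : List (String × Bool)) : Prop := out = create_preprocessor_config_alt benchmark_families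
instance (benchmark_families : List String) (out : List (String × Bool)) : Decidable (Spec_create_preprocessor_config benchmark_families out) := by unfold Spec_create_preprocessor_config; infer_instance

-- ===== CLAIM (what is proved, stated in full; the proofs are below) =====
def Claim_equal_create_preprocessor_config : Prop := ∀ (benchmark_families : List String), Dom_create_preprocessor_config benchmark_families → Spec_create_preprocessor_config benchmark_families (create_preprocessor_config benchmark_families)

-- ===== LEMMAS AND PROOFS =====

-- the loop invariant: folding A's step from an arbitrary three-flag dict ORs each flag
-- with the corresponding per-flag scan
theorem foldA_inv (fams : List String) (d s e : Bool) :
    (fams.foldl pvStepA (PySem.Dict.mk [("distribution", d), ("stability", s), ("embeddings", e)])).items =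
    [("distribution", d || fams.any (fun f => decide (f ∈ ["distribution", "jsdistance", "mmd", "frechet"]))),
     ("stability", s || fams.any (fun f => decide (f ∈ ["stability", "sun"]))),
     ("embeddings", e || fams.any (fun f => decide (f ∈ ["frechet", "distribution"])))] := by
  induction fams generalizing d s e with
  | nil => simp
  | cons f fs ih =>
    simp only [List.foldl_cons, List.any_cons]
    have hstep : pvStepA (PySem.Dict.mk [("distribution", d), ("stability", s), ("embeddings", e)]) f =
        PySem.Dict.mk [("distribution", d || decide (f ∈ ["distribution", "jsdistance", "mmd", "frechet"])),
                       ("stability", s || decide (f ∈ ["stability", "sun"])),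
                       ("embeddings", e || decide (f ∈ ["frechet", "distribution"]))] := by
      simp only [pvStepA, PySem.Dict.insert, List.mem_cons, List.not_mem_nil, or_false]
      split_ifs <;> simp_all
    rw [hstep, ih]
    simp [Bool.or_assoc]

theorem create_preprocessor_config_spec : Claim_equal_create_preprocessor_config := by
  intro fams _
  show create_preprocessor_config fams = create_preprocessor_config_alt fams
  simp only [create_preprocessor_config, create_preprocessor_config_alt]
  rw [show (PySem.Dict.ofList [("distribution", false), ("stability", false), ("embeddings", false)] : PySem.Dict String Bool) = PySem.Dict.mk [("distribution", false), ("stability", false), ("embeddings", false)] from by decide]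
  rw [foldA_inv]
  simp [PySem.Set.ofList, List.mem_cons]
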